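-- pv_equiv track=rewrite | github.com/nuno887/code | Entities.py | _iter_bold_blocks
-- ===== SOURCE A (Python) =====
-- def _iter_bold_blocks(text: str):
--     """
--     Yield Markdown bold blocks **...**; merge adjacent pairs on the SAME line.
--     Returns (outer_start, inner_start, inner_end, outer_end).
--     """
--     n = len(text)
--     i = 0
--     while i < n:
--         open_idx = text.find("**", i)
--         if open_idx == -1:
--             break
--         inner_start = open_idx + 2
--         close_idx = text.find("**", inner_start)
--         if close_idx == -1:
--             break
--
--         # initial block bounds (including **)
--         block_start = open_idx
--         block_end = close_idx + 2
--
--         # try to merge following **...** pairs if only spaces (no newline) lie between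
--         j = block_end
--         while j < n:
--             # stop merging if we see a newline between pairs
--             k = j
--             saw_newline = False
--             while k < n and text[k].isspace():
--                 if text[k] == "\n":
--                     saw_newline = True
--                     break
--                 k += 1
--             if saw_newline:
--                 break
--             # next pair must start immediately after spaces
--             if k + 1 < n and text[k] == "*" and text[k + 1] == "*":
--                 next_open = k
--                 next_inner_start = next_open + 2
--                 next_close = text.find("**", next_inner_start)
--                 if next_close == -1:
--                     break
--                 # extend current block to include this adjacent pair
--                 block_end = next_close + 2
--                 j = block_end
--             else:
--                 break
--
--         yield block_start, inner_start, block_end - 2, block_end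
--         i = block_end
-- ===== SOURCE B (Python) =====
-- def _iter_bold_blocks(text: str):
--     """
--     Yield Markdown bold blocks **...**; merge adjacent pairs on the SAME line.
--     Returns (outer_start, inner_start, inner_end, outer_end).
--
--     Two-phase rewrite: first build the table of raw non-overlapping **...**
--     pairs left to right, then merge consecutive pairs whose gap is only
--     non-newline whitespace in a second pass.
--     """
--     # phase 1: raw pair table as (open, end) index pairs
--     pairs = []
--     pos = 0
--     while True:
--         o = text.find("**", pos)
--         if o == -1:
--             break
--         c = text.find("**", o + 2)
--         if c == -1:
--             break
--         pairs.append((o, c + 2))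
--         pos = c + 2
--     # phase 2: merge pairs separated by non-newline whitespace only
--     if not pairs:
--         return
--     start, end = pairs[0]
--     for o, e in pairs[1:]:
--         if all(ch.isspace() and ch != "\n" for ch in text[end:o]):
--             end = e
--         else:
--             yield start, start + 2, end - 2, end
--             start, end = o, e
--     yield start, start + 2, end - 2, end
-- ===== Notes on version B (the rewrite author's own statement) =====
-- stated objective: alternative
-- what changed: A interleaves pair-finding and merging inside one nested while-loop with a character-by-character whitespace scan; B first builds the complete table of raw **...** pairs with text.find, then merges adjacent table entries in a separate second pass using an all() test on the gap slice.
import Mathlib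
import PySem

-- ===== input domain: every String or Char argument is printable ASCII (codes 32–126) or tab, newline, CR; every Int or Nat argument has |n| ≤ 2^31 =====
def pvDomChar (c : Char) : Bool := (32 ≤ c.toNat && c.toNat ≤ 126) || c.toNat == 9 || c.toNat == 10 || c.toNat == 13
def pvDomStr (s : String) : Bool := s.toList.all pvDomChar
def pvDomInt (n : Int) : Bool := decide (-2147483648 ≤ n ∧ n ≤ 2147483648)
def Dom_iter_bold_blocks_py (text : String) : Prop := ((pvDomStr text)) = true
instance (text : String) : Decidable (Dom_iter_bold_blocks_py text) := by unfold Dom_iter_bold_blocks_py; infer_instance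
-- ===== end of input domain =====

-- B re-implements A in two phases (raw pair table, then a separate merge pass) — objective: a
-- genuinely different decomposition of the same scan, not speed; both are linear in len(text).

-- Shared helper (both Pythons call text.find("**", pos) with 0 ≤ pos ≤ len(text)):
-- Python's -1 is encoded as none.  The `i ≤ cs.length` guard only mirrors CPython's rule that a
-- start past the end yields -1 (PySem.Chars.findFrom agrees; the guard keeps lemmas stateable).
def find2 (cs : List Char) (i : Nat) : Option Nat :=
  if i ≤ cs.length then
    let f := PySem.Chars.findFrom cs ['*', '*'] (i : Int) none
    if f = -1 then none else some f.toNat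
  else none

-- "**" starts at k  ↔  the two characters at k, k+1 are both '*'
lemma pairPrefix_iff (cs : List Char) (k : Nat) :
    (['*', '*'] <+: cs.drop k) ↔ (cs[k]? = some '*' ∧ cs[k + 1]? = some '*') := by
  constructor
  · rintro ⟨t, ht⟩
    have h0 : (cs.drop k)[0]? = some '*' := by rw [← ht]; rfl
    have h1 : (cs.drop k)[1]? = some '*' := by rw [← ht]; rfl
    rw [List.getElem?_drop] at h0 h1
    simpa using ⟨h0, h1⟩
  · rintro ⟨h0, h1⟩
    obtain ⟨hk0, he0⟩ := List.getElem?_eq_some_iff.mp h0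
    obtain ⟨hk1, he1⟩ := List.getElem?_eq_some_iff.mp h1
    refine ⟨cs.drop (k + 2), ?_⟩
    rw [List.drop_eq_getElem_cons hk0, List.drop_eq_getElem_cons hk1, he0, he1]
    simp

-- facts about a successful find (cited by the ports' termination proofs)
lemma find2_some_facts {cs : List Char} {i o : Nat} (h : find2 cs i = some o) :
    i ≤ o ∧ o + 2 ≤ cs.length ∧ cs[o]? = some '*' ∧ cs[o + 1]? = some '*' ∧
      (∀ p, i ≤ p → p < o → ¬(cs[p]? = some '*' ∧ cs[p + 1]? = some '*')) := by
  unfold find2 at h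
  split at h
  case isFalse => exact absurd h (by simp)
  case isTrue hlen =>
    simp only at h
    split at h
    case isTrue => exact absurd h (by simp)
    case isFalse hne =>
      obtain ⟨hge, hpre, hmin⟩ := PySem.Chars.findFrom_natCast_spec cs ['*', '*'] i hlen hne
      have ho : (PySem.Chars.findFrom cs ['*', '*'] (i : Int) none).toNat = o := by
        simpa using h
      have hio : i ≤ o := by omega
      rw [ho] at hpre hmin
      obtain ⟨h0, h1⟩ := (pairPrefix_iff cs o).mp hpre
      have hlt : o + 1 < cs.length := (List.getElem?_eq_some_iff.mp h1).1
      refine ⟨hio, by omega, h0, h1, ?_⟩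
      intro p hip hpo hpair
      exact hmin p hip hpo ((pairPrefix_iff cs p).mpr hpair)

-- isspace scan of the merge loop (A's inner `while k < n and text[k].isspace()`)
def skipWS (cs : List Char) (k : Nat) : Nat × Bool :=
  if h : k < cs.length then
    if PySem.Chars.isspace cs[k] then
      if cs[k] = '\n' then (k, true) else skipWS cs (k + 1)
    else (k, false)
  else (k, false)
termination_by cs.length - k

lemma skipWS_le (cs : List Char) (j : Nat) : j ≤ (skipWS cs j).1 := by
  fun_induction skipWS cs j <;> simp_all
  omega

-- A's merge loop: from current block end j, absorb following adjacent pairs; returns final block end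
def mergeLoop (cs : List Char) (j : Nat) : Nat :=
  if hj : j < cs.length then
    if (skipWS cs j).2 then j
    else if hp : (skipWS cs j).1 + 1 < cs.length ∧ cs[(skipWS cs j).1]? = some '*' ∧
        cs[(skipWS cs j).1 + 1]? = some '*' then
      match hf : find2 cs ((skipWS cs j).1 + 2) with
      | none => j
      | some c2 => mergeLoop cs (c2 + 2)
    else j
  else j
termination_by cs.length - j
decreasing_by
  have h := find2_some_facts hf
  have h2 := skipWS_le cs j
  omega

lemma mergeLoop_ge (cs : List Char) (j : Nat) : j ≤ mergeLoop cs j := by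
  fun_induction mergeLoop cs j with
  | case3 j hj hnl hp c2 hf ih =>
    have h := find2_some_facts hf
    have h2 := skipWS_le cs j
    omega
  | _ => omega

-- ===== PORT A =====
-- outer `while i < n` of _iter_bold_blocks
def aLoop (cs : List Char) (i : Nat) : List (Int × Int × Int × Int) :=
  if hi : i < cs.length then
    match h1 : find2 cs i with
    | none => []
    | some o =>
      match h2 : find2 cs (o + 2) with
      | none => []
      | some c =>
        let e := mergeLoop cs (c + 2)
        ((o : Int), (o : Int) + 2, (e : Int) - 2, (e : Int)) :: aLoop cs e
  else []
termination_by cs.length - i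
decreasing_by
  have ha := find2_some_facts h1
  have hb := find2_some_facts h2
  have hc := mergeLoop_ge cs (c + 2)
  omega

def iter_bold_blocks_py (text : String) : List (Int × Int × Int × Int) :=
  aLoop text.toList 0

-- ===== PORT B =====
-- phase 1: raw pair table (open, end) built left to right
def bPairs (cs : List Char) (i : Nat) : List (Nat × Nat) :=
  match h1 : find2 cs i with
  | none => []
  | some o =>
    match h2 : find2 cs (o + 2) with
    | none => []
    | some c => (o, c + 2) :: bPairs cs (c + 2)
termination_by cs.length - i
decreasing_by
  have ha := find2_some_facts h1
  have hb := find2_some_facts h2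
  omega

-- `all(ch.isspace() and ch != "\n" for ch in text[e:o])`
def gapOK (cs : List Char) (e o : Nat) : Bool :=
  (PySem.List.slice cs (some (e : Int)) (some (o : Int))).all
    (fun c => PySem.Chars.isspace c && (c != '\n'))

-- phase 2: merge pass over the pair table; (s, e) is the block being accumulated
def bMergeRun (cs : List Char) (s e : Nat) (ps : List (Nat × Nat)) : List (Int × Int × Int × Int) :=
  match ps with
  | [] => [((s : Int), (s : Int) + 2, (e : Int) - 2, (e : Int))]
  | (o2, e2) :: t =>
    if gapOK cs e o2 then bMergeRun cs s e2 t
    else ((s : Int), (s : Int) + 2, (e : Int) - 2, (e : Int)) :: bMergeRun cs o2 e2 t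

def iter_bold_blocks_py_alt (text : String) : List (Int × Int × Int × Int) :=
  match bPairs text.toList 0 with
  | [] => []
  | (o, e) :: t => bMergeRun text.toList o e t

-- ===== PRECONDITION & SPEC =====
def Spec_iter_bold_blocks_py (text : String) (out : List (Int × Int × Int × Int)) : Prop := out = iter_bold_blocks_py_alt text
instance (text : String) (out : List (Int × Int × Int × Int)) : Decidable (Spec_iter_bold_blocks_py text out) := by unfold Spec_iter_bold_blocks_py; infer_instance

-- ===== CLAIM (what is proved, stated in full; the proofs are below) =====
def Claim_equal_iter_bold_blocks_py : Prop := ∀ (text : String), Dom_iter_bold_blocks_py text → Spec_iter_bold_blocks_py text (iter_bold_blocks_py text)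

-- ===== LEMMAS AND PROOFS =====

lemma find2_none_facts {cs : List Char} {i : Nat} (hlen : i ≤ cs.length)
    (h : find2 cs i = none) :
    ∀ p, i ≤ p → ¬(cs[p]? = some '*' ∧ cs[p + 1]? = some '*') := by
  intro p hip hpair
  unfold find2 at h
  rw [if_pos hlen] at h
  simp only at h
  split at h
  case isFalse => exact absurd h (by simp)
  case isTrue heq =>
    have hninf := (PySem.Chars.findFrom_natCast_eq_neg_one_iff cs ['*', '*'] i hlen).mp heq
    apply hninf
    have hpre := (pairPrefix_iff cs p).mpr hpair
    have hdd : cs.drop p = (cs.drop i).drop (p - i) := by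
      rw [List.drop_drop]; congr 1; omega
    rw [hdd] at hpre
    exact hpre.isInfix.trans (List.drop_suffix _ _).isInfix

-- full characterisation of skipWS's result
lemma skipWS_facts (cs : List Char) (j : Nat) :
    (∀ p, j ≤ p → p < (skipWS cs j).1 →
        ∃ c, cs[p]? = some c ∧ PySem.Chars.isspace c = true ∧ c ≠ '\n') ∧
    (if (skipWS cs j).2 then cs[(skipWS cs j).1]? = some '\n'
     else cs[(skipWS cs j).1]? = none ∨
       ∃ c, cs[(skipWS cs j).1]? = some c ∧ PySem.Chars.isspace c = false) := by
  fun_induction skipWS cs j with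
  | case1 k hk hs hn =>
    constructor
    · intro p h1 h2; omega
    · rw [if_pos rfl, List.getElem?_eq_some_iff]
      exact ⟨hk, hn⟩
  | case2 k hk hs hn ih =>
    obtain ⟨ih1, ih2⟩ := ih
    constructor
    · intro p h1 h2
      by_cases hpk : p = k
      · subst hpk
        exact ⟨cs[p], List.getElem?_eq_getElem hk, hs, hn⟩
      · exact ih1 p (by omega) h2
    · exact ih2
  | case3 k hk hs =>
    constructor
    · intro p h1 h2; simp at h2; omega
    · rw [if_neg (by simp)]
      right
      exact ⟨cs[k], List.getElem?_eq_getElem hk, by simpa using hs⟩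
  | case4 k hk =>
    constructor
    · intro p h1 h2; simp at h2; omega
    · rw [if_neg (by simp)]
      left
      simp; omega

lemma gapOK_iff (cs : List Char) (e o : Nat) (ho : o ≤ cs.length) :
    gapOK cs e o = true ↔
      ∀ p, e ≤ p → p < o →
        ∃ c, cs[p]? = some c ∧ PySem.Chars.isspace c = true ∧ c ≠ '\n' := by
  unfold gapOK
  rw [PySem.List.slice_natCast, List.all_eq_true]
  constructor
  · intro h p hep hpo
    have hpl : p < cs.length := by omega
    have hmem : cs[p] ∈ List.take (o - e) (List.drop e cs) := by
      rw [List.mem_iff_getElem?]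
      refine ⟨p - e, ?_⟩
      rw [List.getElem?_take, if_pos (by omega), List.getElem?_drop,
        show e + (p - e) = p by omega]
      exact List.getElem?_eq_getElem hpl
    have := h _ hmem
    simp only [Bool.and_eq_true, bne_iff_ne] at this
    exact ⟨cs[p], List.getElem?_eq_getElem hpl, this.1, this.2⟩
  · intro h x hx
    rw [List.mem_iff_getElem?] at hx
    obtain ⟨q, hq⟩ := hx
    rw [List.getElem?_take] at hq
    split at hq
    case isFalse => simp at hq
    case isTrue hqo =>
      rw [List.getElem?_drop] at hq
      obtain ⟨c, hc, hs, hn⟩ := h (e + q) (by omega) (by omega)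
      rw [hc] at hq
      obtain rfl : c = x := by injection hq
      simp [hs, hn]

-- when A's merge scan meets a '**', it is exactly the table's next open index
lemma skip_eq_open (cs : List Char) (j o2 : Nat) (h1 : find2 cs j = some o2)
    (hk : cs[(skipWS cs j).1]? = some '*' ∧ cs[(skipWS cs j).1 + 1]? = some '*') :
    (skipWS cs j).1 = o2 := by
  obtain ⟨hio, hol, ho0, ho1, hmin⟩ := find2_some_facts h1
  obtain ⟨hgap, _⟩ := skipWS_facts cs j
  rcases Nat.lt_trichotomy (skipWS cs j).1 o2 with h | h | h
  · exact absurd hk (hmin _ (skipWS_le cs j) h)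
  · exact h
  · obtain ⟨c, hc, hs, _⟩ := hgap o2 hio h
    rw [ho0] at hc
    obtain rfl : c = '*' := (Option.some.inj hc).symm
    exact absurd hs (by decide)

-- under a clean whitespace gap, A's merge scan stops exactly at the next open index
lemma skip_at_open (cs : List Char) (j o2 : Nat) (h1 : find2 cs j = some o2)
    (hg : gapOK cs j o2 = true) :
    (skipWS cs j).1 = o2 ∧ (skipWS cs j).2 = false := by
  obtain ⟨hio, hol, ho0, ho1, hmin⟩ := find2_some_facts h1
  obtain ⟨hgap, hstop⟩ := skipWS_facts cs j
  have hkj := skipWS_le cs j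
  have hgi := (gapOK_iff cs j o2 (by omega)).mp hg
  have hko2 : (skipWS cs j).1 ≤ o2 := by
    by_contra hgt
    have hgt' : o2 < (skipWS cs j).1 := by omega
    obtain ⟨c, hc, hs, _⟩ := hgap o2 hio hgt'
    rw [ho0] at hc
    obtain rfl : c = '*' := (Option.some.inj hc).symm
    exact absurd hs (by decide)
  have hnl : (skipWS cs j).2 = false := by
    by_contra h
    rw [Bool.not_eq_false] at h
    rw [if_pos h] at hstop
    rcases Nat.lt_or_ge (skipWS cs j).1 o2 with hlt | hge
    · obtain ⟨c, hc, _, hn⟩ := hgi _ hkj hlt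
      rw [hstop] at hc
      exact hn (Option.some.inj hc).symm
    · have he : (skipWS cs j).1 = o2 := by omega
      rw [he, ho0] at hstop
      exact absurd (Option.some.inj hstop) (by decide)
  rw [if_neg (by simp [hnl])] at hstop
  have heq : (skipWS cs j).1 = o2 := by
    rcases Nat.lt_or_ge (skipWS cs j).1 o2 with hlt | hge
    · obtain ⟨c, hc, hs, _⟩ := hgi _ hkj hlt
      rcases hstop with hnone | ⟨c', hc', hs'⟩
      · rw [hnone] at hc; exact absurd hc (by simp)
      · rw [hc] at hc'
        obtain rfl : c = c' := Option.some.inj hc'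
        rw [hs] at hs'; exact absurd hs' (by simp)
    · omega
  exact ⟨heq, hnl⟩

-- the four stop/step cases of A's merge loop, phrased through the pair table's head
lemma mergeLoop_none (cs : List Char) (j : Nat) (hlen : j ≤ cs.length)
    (h : find2 cs j = none) : mergeLoop cs j = j := by
  by_cases hj : j < cs.length
  · rw [mergeLoop, dif_pos hj]
    by_cases hnl : (skipWS cs j).2
    · rw [if_pos hnl]
    · rw [if_neg hnl]
      by_cases hp : ((skipWS cs j).1 + 1 < cs.length ∧ cs[(skipWS cs j).1]? = some '*' ∧
          cs[(skipWS cs j).1 + 1]? = some '*')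
      · exact absurd ⟨hp.2.1, hp.2.2⟩ (find2_none_facts hlen h _ (skipWS_le cs j))
      · rw [dif_neg hp]
  · rw [mergeLoop, dif_neg hj]

lemma mergeLoop_noclose (cs : List Char) (j o2 : Nat)
    (h1 : find2 cs j = some o2) (h2 : find2 cs (o2 + 2) = none) : mergeLoop cs j = j := by
  by_cases hj : j < cs.length
  · rw [mergeLoop, dif_pos hj]
    by_cases hnl : (skipWS cs j).2
    · rw [if_pos hnl]
    · rw [if_neg hnl]
      by_cases hp : ((skipWS cs j).1 + 1 < cs.length ∧ cs[(skipWS cs j).1]? = some '*' ∧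
          cs[(skipWS cs j).1 + 1]? = some '*')
      · rw [dif_pos hp]
        have hko : (skipWS cs j).1 = o2 := skip_eq_open cs j o2 h1 hp.2
        split
        case _ => rfl
        case _ c2 hf =>
          rw [hko, h2] at hf
          exact absurd hf (by simp)
      · rw [dif_neg hp]
  · rw [mergeLoop, dif_neg hj]

lemma mergeLoop_badgap (cs : List Char) (j o2 : Nat)
    (h1 : find2 cs j = some o2) (hg : gapOK cs j o2 = false) : mergeLoop cs j = j := by
  by_cases hj : j < cs.length
  · rw [mergeLoop, dif_pos hj]
    by_cases hnl : (skipWS cs j).2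
    · rw [if_pos hnl]
    · rw [if_neg hnl]
      by_cases hp : ((skipWS cs j).1 + 1 < cs.length ∧ cs[(skipWS cs j).1]? = some '*' ∧
          cs[(skipWS cs j).1 + 1]? = some '*')
      · exfalso
        have hko : (skipWS cs j).1 = o2 := skip_eq_open cs j o2 h1 hp.2
        obtain ⟨hio, hol, _, _, _⟩ := find2_some_facts h1
        obtain ⟨hgap, _⟩ := skipWS_facts cs j
        have : gapOK cs j o2 = true := by
          rw [gapOK_iff cs j o2 (by omega)]
          intro p hp1 hp2
          exact hgap p hp1 (by omega)
        rw [this] at hg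
        exact absurd hg (by simp)
      · rw [dif_neg hp]
  · rw [mergeLoop, dif_neg hj]

lemma mergeLoop_step (cs : List Char) (j o2 c2 : Nat)
    (h1 : find2 cs j = some o2) (h2 : find2 cs (o2 + 2) = some c2)
    (hg : gapOK cs j o2 = true) : mergeLoop cs j = mergeLoop cs (c2 + 2) := by
  obtain ⟨hio, hol, ho0, ho1, _⟩ := find2_some_facts h1
  obtain ⟨hko, hnl⟩ := skip_at_open cs j o2 h1 hg
  have hj : j < cs.length := by omega
  rw [mergeLoop, dif_pos hj, if_neg (by simp [hnl]),
    dif_pos (show (skipWS cs j).1 + 1 < cs.length ∧ cs[(skipWS cs j).1]? = some '*' ∧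
      cs[(skipWS cs j).1 + 1]? = some '*' from by rw [hko]; exact ⟨by omega, ho0, ho1⟩)]
  split
  case _ hf =>
    rw [hko, h2] at hf
    exact absurd hf (by simp)
  case _ c2' hf =>
    rw [hko, h2] at hf
    obtain rfl : c2 = c2' := Option.some.inj hf
    rfl

lemma mergeLoop_le (cs : List Char) (j : Nat) (hlen : j ≤ cs.length) :
    mergeLoop cs j ≤ cs.length := by
  fun_induction mergeLoop cs j with
  | case3 j hj hnl hp c2 hf ih =>
    have h := find2_some_facts hf
    exact ih (by omega)
  | _ => omega

-- B's emit-from-table, started at table suffix bPairs cs i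
def bEmit (cs : List Char) (i : Nat) : List (Int × Int × Int × Int) :=
  match bPairs cs i with
  | [] => []
  | (o, e) :: t => bMergeRun cs o e t

lemma bPairs_none {cs : List Char} {i : Nat} (h1 : find2 cs i = none) : bPairs cs i = [] := by
  rw [bPairs]
  split
  case _ => rfl
  case _ o h => rw [h1] at h; exact absurd h (by simp)

lemma bPairs_noclose {cs : List Char} {i o : Nat} (h1 : find2 cs i = some o)
    (h2 : find2 cs (o + 2) = none) : bPairs cs i = [] := by
  rw [bPairs]
  split
  case _ => rfl
  case _ o' h =>
    rw [h1] at h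
    obtain rfl : o = o' := Option.some.inj h
    split
    case _ => rfl
    case _ c h' => rw [h2] at h'; exact absurd h' (by simp)

lemma bPairs_cons {cs : List Char} {i o c : Nat} (h1 : find2 cs i = some o)
    (h2 : find2 cs (o + 2) = some c) : bPairs cs i = (o, c + 2) :: bPairs cs (c + 2) := by
  rw [bPairs]
  split
  case _ h => rw [h1] at h; exact absurd h (by simp)
  case _ o' h =>
    rw [h1] at h
    obtain rfl : o = o' := Option.some.inj h
    split
    case _ h' => rw [h2] at h'; exact absurd h' (by simp)
    case _ c' h' =>
      rw [h2] at h'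
      obtain rfl : c = c' := Option.some.inj h'
      rfl

-- the merge pass over the table tracks A's merge loop
lemma mergeRun_eq (cs : List Char) :
    ∀ m j s, cs.length - j ≤ m → j ≤ cs.length →
      bMergeRun cs s j (bPairs cs j) =
        ((s : Int), (s : Int) + 2, ((mergeLoop cs j : Nat) : Int) - 2,
          ((mergeLoop cs j : Nat) : Int)) :: bEmit cs (mergeLoop cs j) := by
  intro m
  induction m with
  | zero =>
    intro j s hm hj
    have hfin : find2 cs j = none := by
      rcases h1 : find2 cs j with _ | o
      · rfl
      · have := find2_some_facts h1; omega
    rw [bPairs_none hfin, mergeLoop_none cs j hj hfin, bMergeRun]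
    unfold bEmit
    rw [bPairs_none hfin]
  | succ m ih =>
    intro j s hm hj
    rcases h1 : find2 cs j with _ | o2
    · rw [bPairs_none h1, mergeLoop_none cs j hj h1, bMergeRun]
      unfold bEmit
      rw [bPairs_none h1]
    · rcases h2 : find2 cs (o2 + 2) with _ | c2
      · rw [bPairs_noclose h1 h2, mergeLoop_noclose cs j o2 h1 h2, bMergeRun]
        unfold bEmit
        rw [bPairs_noclose h1 h2]
      · obtain ⟨hio, hol, _, _, _⟩ := find2_some_facts h1
        obtain ⟨hoc, hcl, _, _, _⟩ := find2_some_facts h2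
        rw [bPairs_cons h1 h2, bMergeRun]
        by_cases hg : gapOK cs j o2
        · rw [if_pos hg, mergeLoop_step cs j o2 c2 h1 h2 hg]
          exact ih (c2 + 2) s (by omega) (by omega)
        · rw [if_neg hg, mergeLoop_badgap cs j o2 h1 (by simpa using hg)]
          unfold bEmit
          rw [bPairs_cons h1 h2]

-- A's outer loop emits exactly B's merged table
lemma aLoop_eq_bEmit (cs : List Char) :
    ∀ m i, cs.length - i ≤ m → i ≤ cs.length → aLoop cs i = bEmit cs i := by
  intro m
  induction m with
  | zero =>
    intro i hm hi
    have hfin : find2 cs i = none := by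
      rcases h1 : find2 cs i with _ | o
      · rfl
      · have := find2_some_facts h1; omega
    rw [aLoop, dif_neg (by omega : ¬ i < cs.length)]
    unfold bEmit
    rw [bPairs_none hfin]
  | succ m ih =>
    intro i hm hi
    by_cases hlt : i < cs.length
    · rw [aLoop, dif_pos hlt]
      rcases h1 : find2 cs i with _ | o
      · split
        case _ h => unfold bEmit; rw [bPairs_none h1]
        case _ o h => exact absurd h (by simp)
      · split
        case _ h => exact absurd h (by simp)
        case _ o' h =>
          obtain rfl : o = o' := Option.some.inj h
          rcases h2 : find2 cs (o + 2) with _ | c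
          · split
            case _ h' => unfold bEmit; rw [bPairs_noclose h1 h2]
            case _ c h' => exact absurd h' (by simp)
          · split
            case _ h' => exact absurd h' (by simp)
            case _ c' h' =>
              obtain rfl : c = c' := Option.some.inj h'
              obtain ⟨hio, hol, _, _, _⟩ := find2_some_facts h1
              obtain ⟨hoc, hcl, _, _, _⟩ := find2_some_facts h2
              have hmg := mergeLoop_ge cs (c + 2)
              have hml := mergeLoop_le cs (c + 2) (by omega)
              have hrun := mergeRun_eq cs cs.length (c + 2) o (by omega) (by omega)
              have hrec := ih (mergeLoop cs (c + 2)) (by omega) (by omega)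
              unfold bEmit
              rw [bPairs_cons h1 h2]
              show ((o : Int), (o : Int) + 2, ((mergeLoop cs (c + 2) : Nat) : Int) - 2,
                  ((mergeLoop cs (c + 2) : Nat) : Int)) :: aLoop cs (mergeLoop cs (c + 2)) =
                bMergeRun cs o (c + 2) (bPairs cs (c + 2))
              rw [hrun, hrec]
    · rw [aLoop, dif_neg hlt]
      have hfin : find2 cs i = none := by
        rcases h1 : find2 cs i with _ | o
        · rfl
        · have := find2_some_facts h1; omega
      unfold bEmit
      rw [bPairs_none hfin]

-- ===== VERDICT (by name: the statement is the Claim_ definition above) =====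
theorem iter_bold_blocks_py_spec : Claim_equal_iter_bold_blocks_py := by
  intro text _
  show iter_bold_blocks_py text = iter_bold_blocks_py_alt text
  have h := aLoop_eq_bEmit text.toList (text.toList.length) 0 (by omega) (by omega)
  unfold iter_bold_blocks_py iter_bold_blocks_py_alt
  rw [h]
  rfl
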